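-- pv_equiv track=rewrite | github.com/kkr010128/codebert | problem287/problem287_111.py | answer
-- ===== SOURCE A (Python) =====
-- def answer(N: int) -> str:
--     x = 0
--     for i in range(1, 10):
--         for j in range(1, 10):
--             if N == i * j:
--                 x = 1
--                 return 'Yes'
--     if x == 0:
--         return 'No'
-- ===== SOURCE B (Python) =====
-- def answer(N: int) -> str:
--     for i in range(1, 10):
--         if N % i == 0 and 1 <= N // i <= 9:
--             return 'Yes'
--     return 'No'
-- ===== Notes on version B (the rewrite author's own statement) =====
-- stated objective: simpler
-- what changed: Replaces the nested scan over all pairs of single-digit factors with a single loop over single-digit divisors testing divisibility and that the quotient is itself a single digit.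
import Mathlib
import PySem

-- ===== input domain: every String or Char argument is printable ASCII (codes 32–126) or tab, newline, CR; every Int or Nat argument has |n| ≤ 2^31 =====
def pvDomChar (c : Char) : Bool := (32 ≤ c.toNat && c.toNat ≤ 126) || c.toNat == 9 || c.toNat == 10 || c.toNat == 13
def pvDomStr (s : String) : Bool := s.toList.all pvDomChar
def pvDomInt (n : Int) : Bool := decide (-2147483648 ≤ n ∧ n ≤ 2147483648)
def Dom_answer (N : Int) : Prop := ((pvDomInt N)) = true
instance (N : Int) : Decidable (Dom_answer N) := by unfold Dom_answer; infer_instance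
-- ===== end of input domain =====

-- B replaces A's nested 9×9 equality scan with a single divisor loop (simpler; same cost class).

-- ===== PORT A =====
-- inner loop: for j in range(1,10): if N == i*j: return 'Yes'
def answerInner (N i : Int) : List Int → Option String
  | [] => none
  | j :: rest => if N = i * j then some "Yes" else answerInner N i rest

-- outer loop: for i in range(1,10): …
def answerOuter (N : Int) : List Int → Option String
  | [] => none
  | i :: rest =>
    match answerInner N i (PySem.List.pyRange 1 10 1) with
    | some s => some s
    | none => answerOuter N rest

def answer (N : Int) : String :=
  match answerOuter N (PySem.List.pyRange 1 10 1) with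
  | some s => s
  | none => "No"

-- ===== PORT B =====
-- for i in range(1,10): if N % i == 0 and 1 <= N // i <= 9: return 'Yes'; return 'No'
def answerAltLoop (N : Int) : List Int → String
  | [] => "No"
  | i :: rest =>
    if PySem.Int.mod N i = 0 ∧ 1 ≤ PySem.Int.floordiv N i ∧ PySem.Int.floordiv N i ≤ 9 then "Yes"
    else answerAltLoop N rest

def answer_alt (N : Int) : String := answerAltLoop N (PySem.List.pyRange 1 10 1)

-- ===== PRECONDITION & SPEC =====
def Spec_answer (N : Int) (out : String) : Prop := out = answer_alt N
instance (N : Int) (out : String) : Decidable (Spec_answer N out) := by unfold Spec_answer; infer_instance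

-- ===== CLAIM (what is proved, stated in full; the proofs are below) =====
def Claim_equal_answer : Prop := ∀ (N : Int), Dom_answer N → Spec_answer N (answer N)

-- ===== LEMMAS AND PROOFS =====

lemma inner_none (N i : Int) (l : List Int) (h : ∀ j ∈ l, N ≠ i * j) :
    answerInner N i l = none := by
  induction l with
  | nil => rfl
  | cons j rest ih =>
    simp only [answerInner]
    rw [if_neg (h j (by simp))]
    exact ih (fun j hj => h j (by simp [hj]))

lemma outer_none (N : Int) (l : List Int)
    (h : ∀ i ∈ l, ∀ j ∈ PySem.List.pyRange 1 10 1, N ≠ i * j) :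
    answerOuter N l = none := by
  induction l with
  | nil => rfl
  | cons i rest ih =>
    simp only [answerOuter]
    rw [inner_none N i _ (h i (by simp))]
    exact ih (fun i hi => h i (by simp [hi]))

lemma answer_no_of_out (N : Int) (h : N < 1 ∨ 81 < N) : answer N = "No" := by
  have hr : PySem.List.pyRange 1 10 1 = [1,2,3,4,5,6,7,8,9] := by decide
  unfold answer
  rw [outer_none]
  intro i hi j hj
  rw [hr] at hi hj
  have hi' : 1 ≤ i ∧ i ≤ 9 := by fin_cases hi <;> omega
  have hj' : 1 ≤ j ∧ j ≤ 9 := by fin_cases hj <;> omega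
  have h1 : 1 ≤ i * j := by nlinarith [hi'.1, hj'.1]
  have h2 : i * j ≤ 81 := by nlinarith [hi'.2, hj'.2, hi'.1, hj'.1]
  omega

lemma altLoop_no (N : Int) (l : List Int)
    (hN : N < 1 ∨ 81 < N) (hl : ∀ i ∈ l, 1 ≤ i ∧ i ≤ 9) :
    answerAltLoop N l = "No" := by
  induction l with
  | nil => rfl
  | cons i rest ih =>
    simp only [answerAltLoop]
    rw [if_neg, ih (fun i hi => hl i (by simp [hi]))]
    rintro ⟨hm, hlo, hhi⟩
    have hi := hl i (by simp)
    have key := PySem.Int.floordiv_mul_add_mod N i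
    rw [hm, add_zero] at key
    have h1 : 1 ≤ PySem.Int.floordiv N i * i := by nlinarith [hlo, hi.1]
    have h2 : PySem.Int.floordiv N i * i ≤ 81 := by nlinarith [hhi, hi.2, hlo, hi.1]
    omega

lemma answer_alt_no_of_out (N : Int) (h : N < 1 ∨ 81 < N) : answer_alt N = "No" := by
  have hr : PySem.List.pyRange 1 10 1 = [1,2,3,4,5,6,7,8,9] := by decide
  unfold answer_alt
  rw [hr]
  exact altLoop_no N _ h (by intro i hi; fin_cases hi <;> omega)

-- ===== VERDICT (by name: the statement is the Claim_ definition above) =====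
theorem answer_spec : Claim_equal_answer := by
  intro N _
  unfold Spec_answer
  by_cases h : 1 ≤ N ∧ N ≤ 81
  · obtain ⟨h1, h2⟩ := h
    interval_cases N <;> decide
  · rw [answer_no_of_out N (by omega), answer_alt_no_of_out N (by omega)]
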